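-- pv_equiv track=rewrite | github.com/ducksper/algo_genetique_centrale | mission_d_exploration_martienne.py | normaliser
-- ===== SOURCE A (Python) =====
-- def normaliser(chemin, n):
--     valide = []
--     for point in chemin:
--         if point not in valide:
--             valide.append(point)
--     for k in range(n):
--         if k not in valide:
--             valide.append(k)
--     return valide
-- ===== SOURCE B (Python) =====
-- def normaliser(chemin, n):
--     # sieve-style dedupe: repeatedly emit the head of the remaining sequence
--     # and filter every later occurrence of it out, until nothing is left
--     seq = list(chemin) + list(range(n))
--     out = []
--     while seq:
--         head = seq[0]
--         out.append(head)
--         seq = [x for x in seq[1:] if x != head]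
--     return out
-- ===== Notes on version B (the rewrite author's own statement) =====
-- stated objective: alternative
-- what changed: A builds the answer with two membership-guarded append loops over an accumulator; B instead runs a sieve: it consumes the concatenation chemin+range(n) by repeatedly emitting the head and filtering all of its later occurrences out of the remainder, so no membership test against the output ever happens.
import Mathlib
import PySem

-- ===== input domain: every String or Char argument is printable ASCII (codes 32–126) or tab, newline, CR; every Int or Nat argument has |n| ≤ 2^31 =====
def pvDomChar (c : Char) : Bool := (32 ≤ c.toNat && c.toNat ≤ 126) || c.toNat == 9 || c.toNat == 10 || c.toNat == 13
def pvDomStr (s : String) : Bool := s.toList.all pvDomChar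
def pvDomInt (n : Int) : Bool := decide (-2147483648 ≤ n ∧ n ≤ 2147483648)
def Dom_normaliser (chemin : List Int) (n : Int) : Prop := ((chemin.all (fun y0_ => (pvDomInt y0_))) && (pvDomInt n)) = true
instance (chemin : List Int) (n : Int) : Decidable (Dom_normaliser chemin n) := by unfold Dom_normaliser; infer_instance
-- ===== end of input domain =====

-- B replaces A's two membership-guarded append loops by a sieve over the concatenation
-- chemin + range(n): emit the head, filter its later occurrences out, repeat (alternative
-- decomposition, same return value proved).


-- ===== PORT A =====
def normaliser (chemin : List Int) (n : Int) : List Int :=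
  -- first loop: for point in chemin: if point not in valide: valide.append(point)
  let valide := chemin.foldl
    (fun valide point => if valide.contains point then valide else valide ++ [point]) []
  -- second loop: for k in range(n): if k not in valide: valide.append(k)
  (PySem.List.pyRange 0 n 1).foldl
    (fun valide k => if valide.contains k then valide else valide ++ [k]) valide

-- ===== PORT B =====
-- the while loop of Source B: emit the head, filter its later occurrences out, repeat
def pvSieve (seq : List Int) : List Int :=
  match seq with
  | [] => []
  | head :: rest => head :: pvSieve (rest.filter (fun x => x != head))
termination_by seq.length
decreasing_by
  simpa using Nat.lt_succ_of_le (List.length_filter_le _ _)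

def normaliser_alt (chemin : List Int) (n : Int) : List Int :=
  pvSieve (chemin ++ PySem.List.pyRange 0 n 1)

-- ===== PRECONDITION & SPEC =====
def Spec_normaliser (chemin : List Int) (n : Int) (out : List Int) : Prop := out = normaliser_alt chemin n
instance (chemin : List Int) (n : Int) (out : List Int) : Decidable (Spec_normaliser chemin n out) := by unfold Spec_normaliser; infer_instance

-- ===== CLAIM (what is proved, stated in full; the proofs are below) =====
def Claim_equal_normaliser : Prop := ∀ (chemin : List Int) (n : Int), Dom_normaliser chemin n → Spec_normaliser chemin n (normaliser chemin n)

-- ===== LEMMAS AND PROOFS =====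

-- invariant joining the two programs: A's guarded-append fold from accumulator acc equals
-- acc followed by the sieve of the elements of seq not already in acc
theorem foldl_eq_sieve (seq : List Int) : ∀ (acc : List Int),
    seq.foldl (fun valide point => if valide.contains point then valide else valide ++ [point]) acc
      = acc ++ pvSieve (seq.filter (fun y => !acc.contains y)) := by
  induction seq with
  | nil => intro acc; simp [pvSieve]
  | cons x xs ih =>
    intro acc
    by_cases h : acc.contains x
    · simp only [List.foldl_cons, List.filter_cons, h, Bool.not_true]
      simpa using ih acc
    · have hx : (acc.contains x) = false := by simpa using h
      simp only [List.foldl_cons, hx, Bool.false_eq_true, if_false, List.filter_cons,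
        Bool.not_false, if_true]
      rw [ih (acc ++ [x]), pvSieve]
      have hfilter : xs.filter (fun y => !(acc ++ [x]).contains y)
          = (xs.filter (fun y => !acc.contains y)).filter (fun y => y != x) := by
        rw [List.filter_filter]
        apply List.filter_congr
        intro y _
        simp [Bool.and_comm, bne, beq_eq_decide]
      rw [hfilter]
      simp

theorem normaliser_eq_alt (chemin : List Int) (n : Int) :
    normaliser chemin n = normaliser_alt chemin n := by
  simp only [normaliser, normaliser_alt]
  rw [← List.foldl_append, foldl_eq_sieve]
  simp

-- ===== VERDICT (by name: the statement is the Claim_ definition above) =====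
theorem normaliser_spec : Claim_equal_normaliser := by
  intro chemin n _
  exact normaliser_eq_alt chemin n
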